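-- pv_equiv track=rewrite | github.com/feirik/Writeups | guessing_game_4/solve.py | make_list_eleventh
-- ===== SOURCE A (Python) =====
-- def make_list_eleventh(false_count_list):
--     zero_false_list = []
--     one_false_list = []
--     two_false_list = []
--     three_false_list = []
--
--     iter = 0
--     for i in false_count_list:
--         if i == 0:
--             zero_false_list.append(iter)
--         if i == 1:
--             one_false_list.append(iter)
--         if i == 2:
--             two_false_list.append(iter)
--         if i == 3:
--             three_false_list.append(iter)
--         iter += 1
--
--     remove_zero = zero_false_list[0:2]
--     remove_one = one_false_list[:20]
--     remove_two = two_false_list[:90]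
--     remove_three = three_false_list[:240]
--
--     test_list = remove_zero + remove_one + remove_two + remove_three
--
--     return test_list
-- ===== SOURCE B (Python) =====
-- def make_list_eleventh(false_count_list):
--     remove_zero = [i for i, v in enumerate(false_count_list) if v == 0][:2]
--     remove_one = [i for i, v in enumerate(false_count_list) if v == 1][:20]
--     remove_two = [i for i, v in enumerate(false_count_list) if v == 2][:90]
--     remove_three = [i for i, v in enumerate(false_count_list) if v == 3][:240]
--     return remove_zero + remove_one + remove_two + remove_three
-- ===== Notes on version B (the rewrite author's own statement) =====
-- stated objective: idiomatic
-- what changed: Replaced the single manual-counter bucketing loop over four mutable lists with four independent enumerate-based filtering comprehensions, each sliced to its cap.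
import Mathlib
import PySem

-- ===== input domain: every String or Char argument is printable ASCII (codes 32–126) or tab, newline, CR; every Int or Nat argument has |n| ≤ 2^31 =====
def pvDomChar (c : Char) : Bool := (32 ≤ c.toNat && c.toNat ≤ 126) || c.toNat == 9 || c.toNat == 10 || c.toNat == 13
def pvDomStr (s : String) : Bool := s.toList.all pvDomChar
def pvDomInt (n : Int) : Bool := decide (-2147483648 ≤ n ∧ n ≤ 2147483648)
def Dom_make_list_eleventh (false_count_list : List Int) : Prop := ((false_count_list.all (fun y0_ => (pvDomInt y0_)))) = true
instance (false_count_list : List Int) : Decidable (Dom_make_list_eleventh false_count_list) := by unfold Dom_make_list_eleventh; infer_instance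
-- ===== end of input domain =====

-- B replaces A's single manual-counter bucketing loop with four independent
-- enumerate-based filtering comprehensions (idiomatic; same return value).

-- ===== PORT A =====
-- loop body of A: four accumulator lists plus the manual 'iter' counter
def pvStepA (s : List Int × List Int × List Int × List Int × Int) (i : Int) :
    List Int × List Int × List Int × List Int × Int :=
  ((if i = 0 then s.1 ++ [s.2.2.2.2] else s.1),
   (if i = 1 then s.2.1 ++ [s.2.2.2.2] else s.2.1),
   (if i = 2 then s.2.2.1 ++ [s.2.2.2.2] else s.2.2.1),
   (if i = 3 then s.2.2.2.1 ++ [s.2.2.2.2] else s.2.2.2.1),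
   s.2.2.2.2 + 1)

-- one pass over the list; the final slices [0:2]/[:20]/[:90]/[:240] with
-- nonnegative literal bounds are exactly List.take here
def make_list_eleventh (false_count_list : List Int) : List Int :=
  let s := false_count_list.foldl pvStepA ([], [], [], [], 0)
  s.1.take 2 ++ s.2.1.take 20 ++ s.2.2.1.take 90 ++ s.2.2.2.1.take 240

-- ===== PORT B =====
-- four separate enumerate/filter comprehensions, each sliced to its cap
def make_list_eleventh_alt (false_count_list : List Int) : List Int :=
  let remove_zero := (((PySem.List.enumerate false_count_list).filter (fun p => p.2 == 0)).map (·.1)).take 2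
  let remove_one := (((PySem.List.enumerate false_count_list).filter (fun p => p.2 == 1)).map (·.1)).take 20
  let remove_two := (((PySem.List.enumerate false_count_list).filter (fun p => p.2 == 2)).map (·.1)).take 90
  let remove_three := (((PySem.List.enumerate false_count_list).filter (fun p => p.2 == 3)).map (·.1)).take 240
  remove_zero ++ remove_one ++ remove_two ++ remove_three

-- ===== PRECONDITION & SPEC =====
def Spec_make_list_eleventh (false_count_list : List Int) (out : List Int) : Prop := out = make_list_eleventh_alt false_count_list
instance (false_count_list : List Int) (out : List Int) : Decidable (Spec_make_list_eleventh false_count_list out) := by unfold Spec_make_list_eleventh; infer_instance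

-- ===== CLAIM (what is proved, stated in full; the proofs are below) =====
def Claim_equal_make_list_eleventh : Prop := ∀ (false_count_list : List Int), Dom_make_list_eleventh false_count_list → Spec_make_list_eleventh false_count_list (make_list_eleventh false_count_list)

-- ===== LEMMAS AND PROOFS =====

-- bucket of indices of elements equal to v, with the index starting at 'it'
def pvBucket (l : List Int) (it v : Int) : List Int :=
  ((PySem.List.enumerate l it).filter (fun p => p.2 == v)).map (·.1)

theorem pvBucket_nil (it v : Int) : pvBucket [] it v = [] := rfl

theorem pvBucket_cons (x : Int) (l : List Int) (it v : Int) :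
    pvBucket (x :: l) it v =
      (if x = v then [it] else []) ++ pvBucket l (it + 1) v := by
  by_cases h : x = v <;>
    simp [pvBucket, PySem.List.enumerate_cons, List.filter_cons, h]

theorem fold_spec (l : List Int) (z o t th : List Int) (it : Int) :
    l.foldl pvStepA (z, o, t, th, it)
    = (z ++ pvBucket l it 0, o ++ pvBucket l it 1, t ++ pvBucket l it 2,
       th ++ pvBucket l it 3, it + l.length) := by
  induction l generalizing z o t th it with
  | nil => simp [pvBucket_nil]
  | cons x xs ih =>
    simp only [List.foldl_cons, pvStepA, pvBucket_cons]
    rw [ih]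
    refine congrArg₂ _ ?_ (congrArg₂ _ ?_ (congrArg₂ _ ?_ (congrArg₂ _ ?_ ?_))) <;>
      first
      | (split_ifs with h <;> simp [h])
      | (simp only [List.length_cons]; push_cast; ring)

-- ===== VERDICT (by name: the statement is the Claim_ definition above) =====
theorem make_list_eleventh_spec : Claim_equal_make_list_eleventh := by
  intro l _
  show make_list_eleventh l = make_list_eleventh_alt l
  simp only [make_list_eleventh, make_list_eleventh_alt, fold_spec, pvBucket,
    List.nil_append]
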